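-- pv_equiv track=rewrite | github.com/chiahsun/problem_solving | codecrafters.io/codecrafters-shell-python/main.py | process_buf
-- ===== SOURCE A (Python) =====
-- def process_buf(buf):
--     res, i = [], 0
--     while i < len(buf):
--         c = buf[i]
--         if c == ' ':
--             if res and res[-1] != ' ':
--                 res.append(' ')
--             i += 1
--         elif c == '\\':
--             if i+1 < len(buf):
--                 res.append(buf[i+1])
--                 i += 2
--             else:
--                 i += 1
--         else:
--             res.append(c)
--             i += 1
--     return "".join(res)
-- ===== SOURCE B (Python) =====
-- def process_buf(buf):
--     # pass 1: tokenize into (char, escaped) pairs; a trailing backslash yields no token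
--     toks = []
--     it = iter(buf)
--     for c in it:
--         if c == '\\':
--             nxt = next(it, None)
--             if nxt is not None:
--                 toks.append((nxt, True))
--         else:
--             toks.append((c, False))
--     # pass 2: emit tokens, skipping an unescaped space that would not start/continue output after a space
--     out = []
--     for c, esc in toks:
--         if esc or c != ' ' or (out and out[-1] != ' '):
--             out.append(c)
--     return "".join(out)
-- ===== Notes on version B (the rewrite author's own statement) =====
-- stated objective: alternative
-- what changed: Replaces A's fused single indexed scan by a two-stage pipeline: a first pass tokenizes the string into (char, escaped) pairs resolving backslash escapes (dropping a trailing backslash), and a separate second pass over that token list collapses runs of unescaped spaces while emitting the output.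
import Mathlib
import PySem

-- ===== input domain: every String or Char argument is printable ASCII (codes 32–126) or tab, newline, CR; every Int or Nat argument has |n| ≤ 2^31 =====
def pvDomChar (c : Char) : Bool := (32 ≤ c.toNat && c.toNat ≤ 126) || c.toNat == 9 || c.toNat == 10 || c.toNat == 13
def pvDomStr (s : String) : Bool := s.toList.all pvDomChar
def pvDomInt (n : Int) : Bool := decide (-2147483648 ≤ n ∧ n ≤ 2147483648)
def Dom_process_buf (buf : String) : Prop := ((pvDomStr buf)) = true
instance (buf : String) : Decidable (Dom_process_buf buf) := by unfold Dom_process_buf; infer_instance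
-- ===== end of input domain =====

-- B restructures A's fused indexed scan into two staged passes over an intermediate
-- token list: tokenize (char, escaped) pairs, then collapse unescaped space runs (objective: alternative).


-- ===== PORT A =====
-- A's while-loop over index i with lookahead buf[i+1]; rendered as recursion over the
-- remaining characters (index advances by 1, or by 2 on a non-final backslash).
def loopA (res : List Char) : List Char → List Char
  | [] => res
  | c :: rest =>
    if c = ' ' then
      loopA (if res ≠ [] ∧ res.getLast? ≠ some ' ' then res ++ [' '] else res) rest
    else if c = '\\' then
      match rest with
      | d :: rest' => loopA (res ++ [d]) rest'
      | [] => res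
    else
      loopA (res ++ [c]) rest
termination_by l => l.length

def process_buf (buf : String) : String := String.ofList (loopA [] buf.toList)

-- ===== PORT B =====
-- Pass 1 of B: tokenize into (char, escaped) pairs; a trailing backslash yields no token.
def tokenizeB : List Char → List (Char × Bool)
  | [] => []
  | c :: rest =>
    if c = '\\' then
      match rest with
      | d :: rest' => (d, true) :: tokenizeB rest'
      | [] => []
    else (c, false) :: tokenizeB rest
termination_by l => l.length

-- Pass 2 of B: the body of the for-loop over the token list.
def emitB (out : List Char) (t : Char × Bool) : List Char :=
  if t.2 = true ∨ t.1 ≠ ' ' ∨ (out ≠ [] ∧ out.getLast? ≠ some ' ') then out ++ [t.1] else out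

def process_buf_alt (buf : String) : String :=
  String.ofList ((tokenizeB buf.toList).foldl emitB [])

-- ===== PRECONDITION & SPEC =====
def Spec_process_buf (buf : String) (out : String) : Prop := out = process_buf_alt buf
instance (buf : String) (out : String) : Decidable (Spec_process_buf buf out) := by unfold Spec_process_buf; infer_instance

-- ===== CLAIM (what is proved, stated in full; the proofs are below) =====
def Claim_equal_process_buf : Prop := ∀ (buf : String), Dom_process_buf buf → Spec_process_buf buf (process_buf buf)

-- ===== LEMMAS AND PROOFS =====

theorem loopA_eq_tok_fold (n : ℕ) : ∀ (l : List Char), l.length ≤ n →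
    ∀ (res : List Char), loopA res l = (tokenizeB l).foldl emitB res := by
  induction n with
  | zero =>
    intro l hl res
    match l with
    | [] => simp [loopA, tokenizeB]
    | _ :: _ => simp at hl
  | succ n ih =>
    intro l hl res
    match l with
    | [] => simp [loopA, tokenizeB]
    | c :: rest =>
      by_cases hsp : c = ' '
      · subst hsp
        rw [loopA.eq_def, tokenizeB.eq_def]
        simp only [reduceIte]
        rw [ih rest (by simpa using Nat.le_of_succ_le_succ hl)]
        simp [emitB]
      · by_cases hbs : c = '\\'
        · subst hbs
          match rest with
          | [] =>
            rw [loopA.eq_def, tokenizeB.eq_def]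
            simp
          | d :: rest' =>
            rw [loopA.eq_def, tokenizeB.eq_def]
            simp only [if_neg hsp, reduceIte, List.foldl_cons]
            rw [ih rest' (by simp at hl ⊢; omega)]
            simp [emitB]
        · rw [loopA.eq_def, tokenizeB.eq_def]
          simp only [if_neg hsp, if_neg hbs, List.foldl_cons]
          rw [ih rest (by simpa using Nat.le_of_succ_le_succ hl)]
          simp [emitB, hsp]

-- ===== VERDICT (by name: the statement is the Claim_ definition above) =====
theorem process_buf_spec : Claim_equal_process_buf := by
  intro buf _
  unfold Spec_process_buf process_buf process_buf_alt
  rw [loopA_eq_tok_fold buf.toList.length buf.toList le_rfl]
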